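-- pv_equiv track=rewrite | github.com/xiaohongsimon/prism | prism/web/feed.py | _diversify_by_channel
-- ===== SOURCE A (Python) =====
-- FEED_DIVERSITY_WINDOW = 5
--
-- FEED_DIVERSITY_MAX_PER_TYPE = 2
--
-- def _primary_type(signal: dict) -> str:
--     types = signal.get("source_types") or []
--     return types[0] if types else ""
--
-- def _diversify_by_channel(
--     ranked: list[dict],
--     window: int = FEED_DIVERSITY_WINDOW,
--     max_per_type: int = FEED_DIVERSITY_MAX_PER_TYPE,
-- ) -> list[dict]:
--     """Balanced-greedy interleave.
--
--     Bucket remaining items by source_type (preserving score order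
--     within each bucket). At each step pick from the bucket whose head
--     fits in the trailing window AND which has the LARGEST remaining —
--     so usage stays balanced throughout and we don't end up with a
--     monochrome tail. If no bucket fits (pool too skewed for this
--     stretch), fall back to the bucket with the most remaining.
--     """
--     buckets: dict[str, list[dict]] = {}
--     for s in ranked:
--         buckets.setdefault(_primary_type(s), []).append(s)
--
--     result: list[dict] = []
--     remaining_total = len(ranked)
--     while remaining_total > 0:
--         trailing = result[-(window - 1):] if window > 1 else []
--         trailing_count: dict[str, int] = {}
--         for r in trailing:
--             t = _primary_type(r)
--             trailing_count[t] = trailing_count.get(t, 0) + 1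
--
--         fitters = [
--             t for t, b in buckets.items()
--             if b and trailing_count.get(t, 0) < max_per_type
--         ]
--         if fitters:
--             # Balance tail: prefer the type with the largest remaining.
--             pick_type = max(fitters, key=lambda t: len(buckets[t]))
--         else:
--             # Pool too skewed — pick whichever still has items.
--             pick_type = max(
--                 (t for t, b in buckets.items() if b),
--                 key=lambda t: len(buckets[t]),
--             )
--         result.append(buckets[pick_type].pop(0))
--         remaining_total -= 1
--     return result
-- ===== SOURCE B (Python) =====
-- FEED_DIVERSITY_WINDOW = 5
--
-- FEED_DIVERSITY_MAX_PER_TYPE = 2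
--
--
-- def _ptype(item):
--     ts = item.get("source_types") or []
--     return ts[0] if ts else ""
--
--
-- def _insort(q, e):
--     # priority-list insert: place e before the first entry with a larger key
--     pos = 0
--     while pos < len(q) and q[pos] < e:
--         pos += 1
--     q.insert(pos, e)
--
--
-- def _diversify_by_channel(
--     ranked,
--     window=FEED_DIVERSITY_WINDOW,
--     max_per_type=FEED_DIVERSITY_MAX_PER_TYPE,
-- ):
--     """Priority-queue formulation of the balanced interleave: instead of
--     rebuilding a candidate list and calling max over all buckets each step,
--     keep the non-empty buckets in a priority list ordered by
--     (-remaining, first-seen index).  The step pick is the first entry whose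
--     type is not blocked by the trailing window (falling back to the very
--     first entry), and only the picked entry is re-keyed and re-inserted.
--     Trailing-window counts are maintained incrementally."""
--     pools = {}
--     idx = {}
--     for s in ranked:
--         t = _ptype(s)
--         if t not in pools:
--             idx[t] = len(pools)
--             pools[t] = []
--         pools[t].append(s)
--
--     queue = []  # entries (-remaining, first-seen-index, type), kept sorted
--     for t, b in pools.items():
--         _insort(queue, (-len(b), idx[t], t))
--
--     result = []
--     recent = []  # types of the last min(window-1, len(result)) picks
--     cnt = {}     # running multiset of `recent`
--     for _ in range(len(ranked)):
--         pos = 0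
--         while pos < len(queue) and cnt.get(queue[pos][2], 0) >= max_per_type:
--             pos += 1
--         if pos == len(queue):
--             pos = 0  # every type blocked: fall back to the largest bucket
--         neg, i, t = queue.pop(pos)
--         item = pools[t].pop(0)
--         result.append(item)
--         if neg + 1 < 0:
--             _insort(queue, (neg + 1, i, t))
--         if window > 1:
--             u = _ptype(item)
--             recent.append(u)
--             cnt[u] = cnt.get(u, 0) + 1
--             if len(recent) > window - 1:
--                 v = recent.pop(0)
--                 cnt[v] -= 1
--     return result
-- ===== Notes on version B (the rewrite author's own statement) =====
-- stated objective: alternative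
-- what changed: B replaces A's per-step rebuild (re-slicing the result, re-counting the trailing window, materialising a fitters list and running max over all buckets twice) with a priority list of the non-empty buckets kept sorted by (-remaining, first-seen index): each step takes the first entry whose type is not blocked by the incrementally maintained trailing-window counts (falling back to the very first entry) and re-keys and re-inserts only the picked entry.
import Mathlib
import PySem

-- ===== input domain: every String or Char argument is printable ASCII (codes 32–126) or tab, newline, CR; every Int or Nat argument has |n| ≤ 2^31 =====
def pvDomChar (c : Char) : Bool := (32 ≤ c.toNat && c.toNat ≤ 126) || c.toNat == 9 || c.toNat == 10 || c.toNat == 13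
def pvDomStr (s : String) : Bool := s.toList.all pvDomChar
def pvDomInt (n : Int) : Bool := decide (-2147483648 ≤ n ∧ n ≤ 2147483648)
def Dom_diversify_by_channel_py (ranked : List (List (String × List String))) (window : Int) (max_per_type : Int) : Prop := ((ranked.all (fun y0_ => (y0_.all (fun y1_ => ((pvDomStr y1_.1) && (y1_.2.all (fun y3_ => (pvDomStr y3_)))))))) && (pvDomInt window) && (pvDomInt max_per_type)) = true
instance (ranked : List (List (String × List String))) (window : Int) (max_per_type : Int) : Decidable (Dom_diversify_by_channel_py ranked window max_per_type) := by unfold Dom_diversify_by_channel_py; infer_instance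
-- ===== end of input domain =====

-- B replaces A's per-step rebuild (re-slice the result, re-count the trailing window, rebuild a
-- candidate list, two max calls over all buckets) by a priority list of non-empty buckets kept
-- sorted by (-remaining, first-seen index): the pick is the first entry not blocked by the
-- trailing window (fallback: the first entry), only that entry is re-keyed and re-inserted,
-- and window counts are maintained incrementally (objective: alternative).

-- ===== PORT A =====
-- A-side helper: _primary_type
def primary_type_py (signal : List (String × List String)) : String :=
  let types := ((PySem.Dict.mk signal).get? "source_types").getD []
  match types with
  | [] => ""
  | t :: _ => t

-- the 'while remaining_total > 0' loop, fuel = remaining_total; the '[] =>' arms are totality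
-- guards for states the Python loop never reaches (the picked bucket is never empty there)
def aLoop (window max_per_type : Int) :
    Nat → PySem.Dict String (List (List (String × List String))) →
    List (List (String × List String)) → List (List (String × List String))
  | 0, _, result => result
  | fuel + 1, buckets, result =>
    let trailing := if 1 < window then PySem.List.slice result (some (-(window - 1))) none else []
    let tc : PySem.Dict String Int := trailing.foldl
      (fun d r => d.insert (primary_type_py r) (d.getD (primary_type_py r) 0 + 1)) PySem.Dict.empty
    let fitters := (buckets.items.filter
        (fun p => !p.2.isEmpty && decide (tc.getD p.1 0 < max_per_type))).map (fun p => p.1)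
    let pick :=
      if !fitters.isEmpty then
        (PySem.List.max? fitters (fun t => (buckets.getD t []).length)).getD ""
      else
        (PySem.List.max? ((buckets.items.filter (fun p => !p.2.isEmpty)).map (fun p => p.1))
          (fun t => (buckets.getD t []).length)).getD ""
    match buckets.getD pick [] with
    | it :: rest => aLoop window max_per_type fuel (buckets.insert pick rest) (result ++ [it])
    | [] => aLoop window max_per_type fuel buckets result

def diversify_by_channel_py (ranked : List (List (String × List String))) (window : Int) (max_per_type : Int) : List (List (String × List String)) :=
  let buckets := ranked.foldl
    (fun d s => d.modify (primary_type_py s) [] (fun b => b ++ [s])) PySem.Dict.empty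
  aLoop window max_per_type ranked.length buckets []

-- ===== PORT B =====
-- Python compares the queue's (neg, idx, type) triples with '<'; the (neg, idx) key pairs of any
-- two entries ever compared are distinct (idx is unique per type), so the comparison never
-- reaches the string component and is exactly this lexicographic test on the first two fields.
def keyLtB (a b : Int × Int) : Bool := a.1 < b.1 || (a.1 == b.1 && a.2 < b.2)

-- _insort: the scan 'while pos < len(q) and q[pos] < e: pos += 1' followed by q.insert(pos, e)
def insortB : List ((Int × Int) × String) → ((Int × Int) × String) → List ((Int × Int) × String)
  | [], e => [e]
  | x :: xs, e => if keyLtB x.1 e.1 then x :: insortB xs e else e :: x :: xs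

-- the scan 'while pos < len(queue) and cnt.get(queue[pos][2], 0) >= max_per_type: pos += 1'
def scanPosB (cnt : PySem.Dict String Int) (mpt : Int) : List ((Int × Int) × String) → Nat
  | [] => 0
  | e :: q => if mpt ≤ cnt.getD e.2 0 then scanPosB cnt mpt q + 1 else 0

-- the 'for _ in range(len(ranked))' loop; the 'none'/'[] =>' arms are totality guards for
-- states the Python loop never reaches (the queue and the picked pool are never empty there)
def bLoop (window mpt : Int) :
    Nat → PySem.Dict String (List (List (String × List String))) →
    List ((Int × Int) × String) →
    List (List (String × List String)) → List String → PySem.Dict String Int →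
    List (List (String × List String))
  | 0, _, _, result, _, _ => result
  | fuel + 1, pools, queue, result, recent, cnt =>
    let pos0 := scanPosB cnt mpt queue
    let pos := if pos0 == queue.length then 0 else pos0
    match PySem.List.pop? queue (pos : Int) with
    | none => bLoop window mpt fuel pools queue result recent cnt
    | some (e, qrest) =>
      match pools.getD e.2 [] with
      | [] => bLoop window mpt fuel pools queue result recent cnt
      | it :: pr =>
        let pools' := pools.insert e.2 pr
        let queue' := if e.1.1 + 1 < 0 then insortB qrest ((e.1.1 + 1, e.1.2), e.2) else qrest
        if 1 < window then
          let u := primary_type_py it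
          let recent1 := recent ++ [u]
          let cnt1 := cnt.insert u (cnt.getD u 0 + 1)
          if window - 1 < (recent1.length : Int) then
            match recent1 with
            | v :: rest2 =>
              bLoop window mpt fuel pools' queue' (result ++ [it]) rest2
                (cnt1.insert v (cnt1.getD v 0 - 1))
            | [] => bLoop window mpt fuel pools' queue' (result ++ [it]) recent1 cnt1
          else bLoop window mpt fuel pools' queue' (result ++ [it]) recent1 cnt1
        else bLoop window mpt fuel pools' queue' (result ++ [it]) recent cnt

def diversify_by_channel_py_alt (ranked : List (List (String × List String))) (window : Int) (max_per_type : Int) : List (List (String × List String)) :=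
  let pi := ranked.foldl
    (fun (pi : PySem.Dict String (List (List (String × List String))) × PySem.Dict String Int) s =>
      let t := primary_type_py s
      let pi1 := if pi.1.contains t then pi else (pi.1.insert t [], pi.2.insert t (pi.1.size : Int))
      (pi1.1.modify t [] (fun b => b ++ [s]), pi1.2))
    (PySem.Dict.empty, PySem.Dict.empty)
  -- idx[t] is looked up with getD 0: every t in pools.items is a key of idx, so no KeyError
  let q0 := pi.1.items.foldl
    (fun q p => insortB q ((-(p.2.length : Int), pi.2.getD p.1 0), p.1)) []
  bLoop window max_per_type ranked.length pi.1 q0 [] [] PySem.Dict.empty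

-- ===== PRECONDITION & SPEC =====
def Spec_diversify_by_channel_py (ranked : List (List (String × List String))) (window : Int) (max_per_type : Int) (out : List (List (String × List String))) : Prop := out = diversify_by_channel_py_alt ranked window max_per_type
instance (ranked : List (List (String × List String))) (window : Int) (max_per_type : Int) (out : List (List (String × List String))) : Decidable (Spec_diversify_by_channel_py ranked window max_per_type out) := by unfold Spec_diversify_by_channel_py; infer_instance

-- ===== CLAIM =====
def Claim_equal_diversify_by_channel_py : Prop := ∀ (ranked : List (List (String × List String))) (window : Int) (max_per_type : Int), Dom_diversify_by_channel_py ranked window max_per_type → Spec_diversify_by_channel_py ranked window max_per_type (diversify_by_channel_py ranked window max_per_type)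

-- ===== LEMMAS AND PROOFS =====

-- strict lexicographic order on the (neg, idx) keys, as a Prop
def klt (a b : Int × Int) : Prop := a.1 < b.1 ∨ (a.1 = b.1 ∧ a.2 < b.2)

theorem klt_iff (a b : Int × Int) : keyLtB a b = true ↔ klt a b := by
  unfold keyLtB klt
  rcases a with ⟨a1, a2⟩; rcases b with ⟨b1, b2⟩
  simp only [Bool.or_eq_true, Bool.and_eq_true, beq_iff_eq, decide_eq_true_eq]

theorem klt_asymm (a b : Int × Int) (h1 : klt a b) (h2 : klt b a) : False := by
  unfold klt at *; omega

theorem klt_trans (a b c : Int × Int) (h1 : klt a b) (h2 : klt b c) : klt a c := by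
  unfold klt at *; omega

theorem klt_resolve (a b : Int × Int) (h : ¬ klt a b) (hne : a ≠ b) : klt b a := by
  unfold klt at *
  rcases a with ⟨a1, a2⟩; rcases b with ⟨b1, b2⟩
  simp [Prod.ext_iff] at hne
  omega

-- entry order used for sortedness of the priority list
def ekt (a b : (Int × Int) × String) : Prop := klt a.1 b.1

-- the entry the priority list holds for type t
def entryF (buckets : PySem.Dict String (List (List (String × List String)))) (t : String) :
    (Int × Int) × String :=
  ((-((buckets.getD t []).length : Int), ((List.idxOf t buckets.keys : Nat) : Int)), t)

-- the trailing window A re-slices each step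
def trailingOf (window : Int) (result : List (List (String × List String))) :
    List (List (String × List String)) :=
  if 1 < window then PySem.List.slice result (some (-(window - 1))) none else []

theorem trailingOf_pos (window : Int) (hw : 1 < window)
    (result : List (List (String × List String))) :
    trailingOf window result = result.drop (result.length - (window - 1).toNat) := by
  unfold trailingOf
  rw [if_pos hw]
  have h1 : -(window - 1) = -(((window - 1).toNat : Nat) : Int) := by
    rw [Int.toNat_of_nonneg (by omega)]
  rw [h1, PySem.List.slice_from_neg_natCast _ _ (by omega)]

theorem items_filter_map_fst {ν : Type} (d : PySem.Dict String ν) (hnd : d.keys.Nodup)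
    (dflt : ν) (P : String → ν → Bool) :
    (d.items.filter (fun p => P p.1 p.2)).map (fun p => p.1)
      = d.keys.filter (fun k => P k (d.getD k dflt)) := by
  rw [PySem.Dict.items_eq_map_keys d hnd dflt, List.filter_map, List.map_map]
  have : ((fun (p : String × ν) => p.1) ∘ fun k => (k, d.getD k dflt)) = id := rfl
  rw [this, List.map_id]
  rfl

theorem tc_getD (trailing : List (List (String × List String))) (t : String) :
    (trailing.foldl
      (fun d r => d.insert (primary_type_py r) (d.getD (primary_type_py r) 0 + 1))
      (PySem.Dict.empty : PySem.Dict String Int)).getD t 0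
      = ((trailing.map primary_type_py).count t : Int) := by
  rw [← List.foldl_map (f := primary_type_py)
    (g := fun (d : PySem.Dict String Int) x => d.insert x (d.getD x 0 + 1))]
  rw [PySem.Dict.getD_foldl_insert_add_one]
  simp [PySem.Dict.getD_empty]

theorem cnt_pop_inv (cnt : PySem.Dict String Int) (r0 u u' : String) (rtl : List String)
  (hcnt : ∀ v, cnt.getD v 0 = (List.count v (r0 :: rtl) : Int)) :
  ((cnt.insert u (cnt.getD u 0 + 1)).insert r0 ((cnt.insert u (cnt.getD u 0 + 1)).getD r0 0 - 1)).getD u' 0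
    = (List.count u' (rtl ++ [u]) : Int) := by
  have h1 := hcnt u'
  have h2 := hcnt r0
  have h3 := hcnt u
  clear hcnt
  simp only [List.count_cons, List.count_append, List.count_nil, beq_iff_eq] at h1 h2 h3 ⊢
  rw [PySem.Dict.getD_insert, PySem.Dict.getD_insert, PySem.Dict.getD_insert]
  by_cases ha : u' = r0
  · subst ha
    by_cases hc : u = u'
    · subst hc
      simp only [if_pos rfl, eq_self_iff_true, if_true, ite_true] at *
      omega
    · simp only [if_neg hc, if_neg (Ne.symm hc), if_pos rfl, eq_self_iff_true, if_true, ite_true] at *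
      omega
  · by_cases hb : u' = u
    · subst hb
      simp only [if_neg ha, if_neg (Ne.symm ha), if_pos rfl, eq_self_iff_true, if_true, ite_true] at *
      omega
    · by_cases hc : r0 = u
      · subst hc
        simp only [if_neg ha, if_neg (Ne.symm ha), if_pos rfl, eq_self_iff_true, if_true, ite_true] at *
        omega
      · simp only [if_neg ha, if_neg (Ne.symm ha), if_neg hb, if_neg (Ne.symm hb),
          if_neg hc, if_neg (Ne.symm hc)] at *
        omega

theorem cnt_push_inv (cnt : PySem.Dict String Int) (u u' : String) (recent : List String)
  (hcnt : ∀ v, cnt.getD v 0 = (List.count v recent : Int)) :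
  (cnt.insert u (cnt.getD u 0 + 1)).getD u' 0 = (List.count u' (recent ++ [u]) : Int) := by
  have h1 := hcnt u'
  have h3 := hcnt u
  clear hcnt
  simp only [List.count_cons, List.count_append, List.count_nil, beq_iff_eq] at h1 h3 ⊢
  rw [PySem.Dict.getD_insert]
  by_cases hb : u' = u
  · subst hb
    simp only [if_pos rfl, eq_self_iff_true, if_true, ite_true] at *
    omega
  · simp only [if_neg hb, if_neg (Ne.symm hb)] at *
    omega

-- ---- priority-list lemmas ----

theorem insort_perm (q : List ((Int × Int) × String)) (e : (Int × Int) × String) :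
    (insortB q e).Perm (e :: q) := by
  induction q with
  | nil => simp [insortB]
  | cons x xs ih =>
    unfold insortB
    split
    · exact (ih.cons x).trans (List.Perm.swap e x xs)
    · exact List.Perm.refl _

theorem insort_sorted (q : List ((Int × Int) × String)) (e : (Int × Int) × String)
    (hs : q.Pairwise ekt) (hk : ∀ x ∈ q, x.1 ≠ e.1) : (insortB q e).Pairwise ekt := by
  induction q with
  | nil => simp [insortB, List.pairwise_singleton]
  | cons x xs ih =>
    unfold insortB
    obtain ⟨hx, hxs⟩ := List.pairwise_cons.mp hs
    split
    · rename_i hlt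
      refine List.Pairwise.cons ?_ (ih hxs (fun y hy => hk y (List.mem_cons_of_mem x hy)))
      intro y hy
      have hy' := (insort_perm xs e).mem_iff.mp hy
      rcases List.mem_cons.mp hy' with h | h
      · subst h; exact (klt_iff x.1 y.1).mp hlt
      · exact hx y h
    · rename_i hnlt
      have hex : ekt e x := by
        apply klt_resolve
        · intro hc; exact hnlt ((klt_iff x.1 e.1).mpr hc)
        · exact hk x List.mem_cons_self
      refine List.Pairwise.cons ?_ (List.Pairwise.cons hx hxs)
      intro y hy
      rcases List.mem_cons.mp hy with h | h
      · subst h; exact hex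
      · exact klt_trans _ _ _ hex (hx y h)

theorem foldl_insort (es : List ((Int × Int) × String)) :
    ∀ (q : List ((Int × Int) × String)), q.Pairwise ekt →
    (q ++ es).Pairwise (fun a b => a.1 ≠ b.1) →
    (es.foldl insortB q).Pairwise ekt ∧ (es.foldl insortB q).Perm (q ++ es) := by
  induction es with
  | nil => intro q hs _; exact ⟨hs, by simp⟩
  | cons e es ih =>
    intro q hs hne
    have hkq : ∀ x ∈ q, x.1 ≠ e.1 := by
      intro x hx
      have := (List.pairwise_append.mp hne).2.2
      exact this x hx e (List.mem_cons_self)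
    have hs' : (insortB q e).Pairwise ekt := insort_sorted q e hs hkq
    have hperm1 : (insortB q e).Perm (e :: q) := insort_perm q e
    have hne' : ((insortB q e) ++ es).Pairwise (fun a b => a.1 ≠ b.1) := by
      have hsymm : ∀ {x y : (Int × Int) × String}, x.1 ≠ y.1 → y.1 ≠ x.1 := fun h => Ne.symm h
      have hp : ((insortB q e) ++ es).Perm (q ++ e :: es) :=
        (hperm1.append_right es).trans (List.perm_middle.symm)
      exact (List.Perm.pairwise_iff hsymm hp).mpr hne
    obtain ⟨h1, h2⟩ := ih (insortB q e) hs' hne'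
    exact ⟨h1, h2.trans ((hperm1.append_right es).trans (List.perm_middle.symm))⟩

theorem scanPos_eq (cnt : PySem.Dict String Int) (mpt : Int)
    (q : List ((Int × Int) × String)) :
    scanPosB cnt mpt q = (q.takeWhile (fun e => decide (mpt ≤ cnt.getD e.2 0))).length := by
  induction q with
  | nil => rfl
  | cons e q ih =>
    unfold scanPosB
    rw [List.takeWhile_cons]
    by_cases h : mpt ≤ cnt.getD e.2 0
    · simp [h, ih]
    · simp [h]

-- ---- first-max characterisation (A's max over a list with strictly increasing tie-break index) ----

def updG (f : String → Nat) (o : Option String) (t : String) : Option String :=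
  match o with
  | none => some t
  | some b => if f b < f t then some t else some b

theorem max?_eq_foldl_updG (f : String → Nat) (l : List String) :
    PySem.List.max? l f = l.foldl (updG f) none := by
  unfold PySem.List.max?
  congr 1
  funext o t
  cases o <;> rfl

theorem foldl_updG_char (f : String → Nat) (g : String → Int) :
    ∀ (l : List String) (m : String), (m :: l).Pairwise (fun a b => g a < g b) →
    ∃ m', l.foldl (updG f) (some m) = some m' ∧ m' ∈ m :: l ∧
      ∀ x ∈ m :: l, x ≠ m' → klt (-(f m' : Int), g m') (-(f x : Int), g x) := by
  intro l
  induction l with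
  | nil =>
    intro m _
    refine ⟨m, rfl, List.mem_cons_self, ?_⟩
    intro x hx hne
    rcases List.mem_cons.mp hx with h | h
    · exact absurd h hne
    · cases h
  | cons a l ih =>
    intro m hp
    rcases hp with _ | ⟨hm, hp'⟩
    rcases hp' with _ | ⟨ha, hl⟩
    rw [List.foldl_cons]
    by_cases hfa : f m < f a
    · have hpa : (a :: l).Pairwise (fun a b => g a < g b) := List.Pairwise.cons ha hl
      obtain ⟨m', he, hmem, hmin⟩ := ih a hpa
      have hstep : updG f (some m) a = some a := by simp [updG, hfa]
      refine ⟨m', by rw [hstep]; exact he, ?_, ?_⟩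
      · rcases List.mem_cons.mp hmem with h | h
        · exact h ▸ List.mem_cons_of_mem m (List.mem_cons_self)
        · exact List.mem_cons_of_mem m (List.mem_cons_of_mem a h)
      · intro x hx hne
        rcases List.mem_cons.mp hx with h | h
        · -- x = m
          subst h
          have h1 : klt (-(f m' : Int), g m') (-(f a : Int), g a) ∨ m' = a := by
            by_cases hma : m' = a
            · right; exact hma
            · left; exact hmin a List.mem_cons_self (Ne.symm hma)
          have h2 : klt (-(f a : Int), g a) (-(f x : Int), g x) := by
            left; omega
          rcases h1 with h1 | h1
          · exact klt_trans _ _ _ h1 h2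
          · subst h1; exact h2
        · exact hmin x h hne
    · have hpm : (m :: l).Pairwise (fun a b => g a < g b) := by
        refine List.Pairwise.cons ?_ hl
        intro y hy
        exact lt_trans (hm a List.mem_cons_self) (ha y hy)
      obtain ⟨m', he, hmem, hmin⟩ := ih m hpm
      have hstep : updG f (some m) a = some m := by simp [updG, hfa]
      refine ⟨m', by rw [hstep]; exact he, ?_, ?_⟩
      · rcases List.mem_cons.mp hmem with h | h
        · exact h ▸ List.mem_cons_self
        · exact List.mem_cons_of_mem m (List.mem_cons_of_mem a h)
      · intro x hx hne
        rcases List.mem_cons.mp hx with h | h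
        · subst h; exact hmin x List.mem_cons_self hne
        rcases List.mem_cons.mp h with h' | h'
        · -- x = a : key m' ≤ key m < key a
          subst h'
          have hma : klt (-(f m : Int), g m) (-(f x : Int), g x) := by
            rcases lt_or_eq_of_le (not_lt.mp hfa) with h'' | h''
            · left; omega
            · right; exact ⟨by omega, hm x List.mem_cons_self⟩
          by_cases hmm : m' = m
          · subst hmm; exact hma
          · exact klt_trans _ _ _ (hmin m List.mem_cons_self (Ne.symm hmm)) hma
        · exact hmin x (List.mem_cons_of_mem m h') hne

theorem max?_char (f : String → Nat) (g : String → Int) (l : List String)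
    (hp : l.Pairwise (fun a b => g a < g b)) (hne : l ≠ []) :
    ∃ m', PySem.List.max? l f = some m' ∧ m' ∈ l ∧
      ∀ x ∈ l, x ≠ m' → klt (-(f m' : Int), g m') (-(f x : Int), g x) := by
  rcases l with _ | ⟨x0, xs⟩
  · exact absurd rfl hne
  rw [max?_eq_foldl_updG, List.foldl_cons]
  have hstep : updG f none x0 = some x0 := rfl
  rw [hstep]
  exact foldl_updG_char f g xs x0 hp

theorem pairwise_idxOf (order : List String) (h : order.Nodup) :
    order.Pairwise (fun a b => ((List.idxOf a order : Nat) : Int) < ((List.idxOf b order : Nat) : Int)) := by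
  rw [List.pairwise_iff_getElem]
  intro i j hi hj hij
  rw [List.Nodup.idxOf_getElem h i hi, List.Nodup.idxOf_getElem h j hj]
  exact_mod_cast hij

-- entries of distinct types carry distinct tie-break indices
theorem entries_pairwise_idx (buckets : PySem.Dict String (List (List (String × List String))))
    (hnd : buckets.keys.Nodup) (C : List String) (hsub : C.Sublist buckets.keys) :
    (C.map (entryF buckets)).Pairwise (fun a b => a.1.2 ≠ b.1.2) := by
  rw [List.pairwise_map]
  have hCp : C.Pairwise (fun a b => ((List.idxOf a buckets.keys : Nat) : Int) < ((List.idxOf b buckets.keys : Nat) : Int)) :=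
    (pairwise_idxOf buckets.keys hnd).sublist hsub
  exact hCp.imp (by intro a b h; simp only [entryF]; omega)

-- ---- build phase ----

theorem build_eq2 (l : List (List (String × List String))) :
    ∀ (d : PySem.Dict String (List (List (String × List String)))) (ix : PySem.Dict String Int),
    d.keys.Nodup →
    (∀ t ∈ d.keys, ix.getD t 0 = ((List.idxOf t d.keys : Nat) : Int)) →
    (l.foldl
      (fun (pi : PySem.Dict String (List (List (String × List String))) × PySem.Dict String Int) s =>
        let t := primary_type_py s
        let pi1 := if pi.1.contains t then pi else (pi.1.insert t [], pi.2.insert t (pi.1.size : Int))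
        (pi1.1.modify t [] (fun b => b ++ [s]), pi1.2)) (d, ix)).1
      = l.foldl (fun d s => d.modify (primary_type_py s) [] (fun b => b ++ [s])) d ∧
    (∀ t ∈ (l.foldl (fun d s => d.modify (primary_type_py s) [] (fun b => b ++ [s])) d).keys,
      (l.foldl
        (fun (pi : PySem.Dict String (List (List (String × List String))) × PySem.Dict String Int) s =>
          let t := primary_type_py s
          let pi1 := if pi.1.contains t then pi else (pi.1.insert t [], pi.2.insert t (pi.1.size : Int))
          (pi1.1.modify t [] (fun b => b ++ [s]), pi1.2)) (d, ix)).2.getD t 0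
        = ((List.idxOf t (l.foldl (fun d s => d.modify (primary_type_py s) [] (fun b => b ++ [s])) d).keys : Nat) : Int)) := by
  induction l with
  | nil => intro d ix hnd hix; exact ⟨rfl, hix⟩
  | cons s l ih =>
    intro d ix hnd hix
    rw [List.foldl_cons, List.foldl_cons]
    set t := primary_type_py s with ht
    by_cases hc : d.contains t = true
    · have hkeys : (d.modify t [] (fun b => b ++ [s])).keys = d.keys := by
        rw [PySem.Dict.keys_modify, PySem.Dict.keys_insert_of_contains d _ hc]
      have hstep :
          (let t := primary_type_py s
           let pi1 := if d.contains t then ((d, ix) : _ × _) else (d.insert t [], ix.insert t (d.size : Int))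
           ((pi1.1.modify t [] (fun b => b ++ [s]), pi1.2) : _ × _))
          = (d.modify t [] (fun b => b ++ [s]), ix) := by
        simp only [← ht, hc, if_true]
      rw [hstep]
      exact ih _ _ (by rw [hkeys]; exact hnd) (by rw [hkeys]; exact hix)
    · have hc' : d.contains t = false := by simpa using hc
      have h1 : (d.insert t []).modify t [] (fun b => b ++ [s]) = d.modify t [] (fun b => b ++ [s]) := by
        unfold PySem.Dict.modify
        rw [PySem.Dict.getD_insert_self, PySem.Dict.insert_insert_self,
          PySem.Dict.getD_of_not_contains d _ hc']
      have hkeys : (d.modify t [] (fun b => b ++ [s])).keys = d.keys ++ [t] := by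
        rw [PySem.Dict.keys_modify, PySem.Dict.keys_insert_of_not_contains d _ hc']
      have htnm : t ∉ d.keys := by
        intro hmem
        rw [(PySem.Dict.contains_iff_mem_keys d t).mpr hmem] at hc'
        cases hc'
      have hstep :
          (let t := primary_type_py s
           let pi1 := if d.contains t then ((d, ix) : _ × _) else (d.insert t [], ix.insert t (d.size : Int))
           ((pi1.1.modify t [] (fun b => b ++ [s]), pi1.2) : _ × _))
          = (d.modify t [] (fun b => b ++ [s]), ix.insert t (d.size : Int)) := by
      
        simp only [← ht, hc', Bool.false_eq_true, if_false, h1]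
      rw [hstep]
      refine ih _ _ (by rw [hkeys]; exact List.Nodup.append hnd (List.nodup_singleton t) (List.disjoint_singleton.mpr htnm)) ?_
      intro u hu
      rw [hkeys] at hu ⊢
      by_cases hut : u = t
      · rw [hut, PySem.Dict.getD_insert_self]
        have hidx : List.idxOf t (d.keys ++ [t]) = d.keys.length := by
          simp [List.idxOf_append, htnm]
        rw [hidx]
        simp [PySem.Dict.size, PySem.Dict.keys]
      · rw [PySem.Dict.getD_insert_of_ne _ _ _ hut]
        rcases List.mem_append.mp hu with hu' | hu'
        · have hidx : List.idxOf u (d.keys ++ [t]) = List.idxOf u d.keys := by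
            simp [List.idxOf_append, hu']
          rw [hidx]
          exact hix u hu'
        · simp at hu'
          exact absurd hu' hut

theorem buckets_nonempty (l : List (List (String × List String))) :
    ∀ (d : PySem.Dict String (List (List (String × List String)))),
    (∀ t ∈ d.keys, d.getD t [] ≠ []) →
    ∀ t ∈ (l.foldl (fun d s => d.modify (primary_type_py s) [] (fun b => b ++ [s])) d).keys,
      (l.foldl (fun d s => d.modify (primary_type_py s) [] (fun b => b ++ [s])) d).getD t [] ≠ [] := by
  induction l with
  | nil => intro d h; exact h
  | cons s l ih =>
    intro d h
    rw [List.foldl_cons]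
    apply ih
    intro u hu
    set t0 := primary_type_py s
    by_cases hut : u = t0
    · subst hut
      rw [PySem.Dict.getD_modify_self]
      simp
    · rw [PySem.Dict.getD_modify_of_ne _ _ _ (by exact hut)]
      apply h
      have := PySem.Dict.keys_modify (d := d) (k := t0) (d0 := ([] : List (List (String × List String)))) (f := fun b => b ++ [s])
      rw [this] at hu
      rcases (PySem.Dict.mem_keys_insert _ _ _ _).mp hu with h' | h'
      · exact absurd h' hut
      · exact h'

-- drop-one lemma for the candidate filter when a bucket empties
theorem filter_erase_point (t : String) (p p' : String → Bool)
    (hagree : ∀ x, x ≠ t → p' x = p x) (hpt : p t = true) (hpt' : p' t = false) :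
    ∀ (l : List String), l.Nodup → l.filter p' = (l.filter p).erase t := by
  intro l
  induction l with
  | nil => intro _; rfl
  | cons a l ih =>
    intro hnd
    rcases List.nodup_cons.mp hnd with ⟨hna, hnd'⟩
    by_cases hat : a = t
    · subst hat
      rw [List.filter_cons, List.filter_cons, hpt, hpt']
      simp only [if_true, Bool.false_eq_true, if_false, List.erase_cons_head]
      exact List.filter_congr (fun x hx => hagree x (fun he => hna (he ▸ hx)))
    · rw [List.filter_cons, List.filter_cons, hagree a hat]
      by_cases hpa : p a = true
      · rw [hpa]
        simp only [if_true]
        rw [List.erase_cons_tail (by simp [hat])]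
        rw [ih hnd']
      · have hpa' : p a = false := by simpa using hpa
        rw [hpa']
        simp only [Bool.false_eq_true, if_false]
        exact ih hnd'

-- after a pick both loops do the same trailing-window bookkeeping and recurse
theorem window_step (window mpt : Int) (fuel : Nat)
    (ih : ∀ (buckets : PySem.Dict String (List (List (String × List String))))
      (queue : List ((Int × Int) × String))
      (result : List (List (String × List String)))
      (recent : List String) (cnt : PySem.Dict String Int),
      buckets.keys.Nodup →
      recent = (trailingOf window result).map primary_type_py →
      (∀ u, cnt.getD u 0 = (recent.count u : Int)) →
      queue.Pairwise ekt →
      queue.Perm ((buckets.keys.filter (fun t => !(buckets.getD t []).isEmpty)).map (entryF buckets)) →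
      aLoop window mpt fuel buckets result
  = bLoop window mpt fuel buckets queue result recent cnt)
    (buckets' : PySem.Dict String (List (List (String × List String))))
    (queue' : List ((Int × Int) × String))
    (result : List (List (String × List String)))
    (recent : List String) (cnt : PySem.Dict String Int)
    (it : List (String × List String))
    (hnd' : buckets'.keys.Nodup)
    (hrec : recent = (trailingOf window result).map primary_type_py)
    (hcnt : ∀ u, cnt.getD u 0 = (recent.count u : Int))
    (hqs' : queue'.Pairwise ekt)
    (hqp' : queue'.Perm ((buckets'.keys.filter (fun t => !(buckets'.getD t []).isEmpty)).map (entryF buckets'))) :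
    aLoop window mpt fuel buckets' (result ++ [it])
    = (if 1 < window then
   if window - 1 < ((recent ++ [primary_type_py it]).length : Int) then
     match recent ++ [primary_type_py it] with
     | v :: rest2 =>
       bLoop window mpt fuel buckets' queue' (result ++ [it]) rest2
         ((cnt.insert (primary_type_py it) (cnt.getD (primary_type_py it) 0 + 1)).insert v
           ((cnt.insert (primary_type_py it) (cnt.getD (primary_type_py it) 0 + 1)).getD v 0 - 1))
     | [] =>
       bLoop window mpt fuel buckets' queue' (result ++ [it]) (recent ++ [primary_type_py it])
         (cnt.insert (primary_type_py it) (cnt.getD (primary_type_py it) 0 + 1))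
   else
     bLoop window mpt fuel buckets' queue' (result ++ [it]) (recent ++ [primary_type_py it])
       (cnt.insert (primary_type_py it) (cnt.getD (primary_type_py it) 0 + 1))
       else bLoop window mpt fuel buckets' queue' (result ++ [it]) recent cnt) := by
  by_cases hw : 1 < window
  · rw [if_pos hw]
    have hkn : ((window - 1).toNat : Int) = window - 1 := Int.toNat_of_nonneg (by omega)
    have hrecd : recent = (result.drop (result.length - (window - 1).toNat)).map primary_type_py := by
      rw [hrec, trailingOf_pos window hw]
    have hlen : recent.length = result.length - (result.length - (window - 1).toNat) := by
      rw [hrecd]; simp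
    have htrail' : trailingOf window (result ++ [it])
        = (result ++ [it]).drop (result.length + 1 - (window - 1).toNat) := by
      rw [trailingOf_pos window hw]; simp
    by_cases hcase : (window - 1).toNat ≤ result.length
    · have hlen' : recent.length = (window - 1).toNat := by omega
      have hcond : window - 1 < ((recent ++ [primary_type_py it]).length : Int) := by
        rw [List.length_append, hlen', List.length_singleton]
        push_cast
        omega
      rw [if_pos hcond]
      rcases hrecc : recent with _ | ⟨r0, rtl⟩
      · rw [hrecc] at hlen'; simp at hlen'; omega
      · simp only [List.cons_append]
        refine ih buckets' queue' _ _ _ hnd' ?_ ?_ hqs' hqp'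
        · rw [htrail',
            List.drop_append_of_le_length (by simp; omega), List.map_append]
          have hrtl : rtl = (result.drop (result.length + 1 - (window - 1).toNat)).map primary_type_py := by
            have hh := congrArg List.tail hrecd
            rw [hrecc] at hh
            simp only [List.tail_cons] at hh
            rw [hh, ← List.map_tail, List.tail_drop]
            have h9 : result.length - (window - 1).toNat + 1
                = result.length + 1 - (window - 1).toNat := by omega
            rw [h9]
          rw [← hrtl]
          simp
        · intro u'
          exact cnt_pop_inv cnt r0 (primary_type_py it) u' rtl (by rw [← hrecc]; exact hcnt)
    · have hlen' : recent.length = result.length := by omega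
      have hcond : ¬ (window - 1 < ((recent ++ [primary_type_py it]).length : Int)) := by
        rw [List.length_append, hlen', List.length_singleton]
        push_cast
        omega
      rw [if_neg hcond]
      refine ih buckets' queue' _ _ _ hnd' ?_ ?_ hqs' hqp'
      · rw [htrail']
        have h0 : result.length + 1 - (window - 1).toNat = 0 := by omega
        have h0' : result.length - (window - 1).toNat = 0 := by omega
        rw [h0, List.drop_zero, List.map_append]
        rw [h0', List.drop_zero] at hrecd
        rw [← hrecd]
        simp
      · intro u'
        exact cnt_push_inv cnt (primary_type_py it) u' recent hcnt
  · rw [if_neg hw]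
    refine ih buckets' queue' _ _ _ hnd' ?_ hcnt hqs' hqp'
    have h0 : trailingOf window (result ++ [it]) = [] := by
      unfold trailingOf; rw [if_neg hw]
    have h0' : trailingOf window result = [] := by
      unfold trailingOf; rw [if_neg hw]
    rw [h0]
    rw [h0'] at hrec
    simpa using hrec

-- ---- the main loop equivalence ----

-- A's max over a fitters/candidates list equals the type whose entry-key is strictly minimal
theorem max?_getD_eq (f : String → Nat) (g : String → Int) (l : List String)
    (hp : l.Pairwise (fun a b => g a < g b)) (t₀ : String) (ht : t₀ ∈ l)
    (hmin : ∀ x ∈ l, x ≠ t₀ → klt (-(f t₀ : Int), g t₀) (-(f x : Int), g x)) :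
    (PySem.List.max? l f).getD "" = t₀ := by
  obtain ⟨m', hm', hmem, hchar⟩ := max?_char f g l hp (List.ne_nil_of_mem ht)
  rw [hm']
  have hmt : m' = t₀ := by
    by_contra hne
    exact klt_asymm _ _ (hchar t₀ ht (fun h => hne h.symm)) (hmin m' hmem hne)
  simp [hmt]

-- ---- the main loop equivalence ----

theorem loop_eq (window mpt : Int) (fuel : Nat) :
    ∀ (buckets : PySem.Dict String (List (List (String × List String))))
      (queue : List ((Int × Int) × String))
      (result : List (List (String × List String)))
      (recent : List String) (cnt : PySem.Dict String Int),
    buckets.keys.Nodup →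
    recent = (trailingOf window result).map primary_type_py →
    (∀ u, cnt.getD u 0 = (recent.count u : Int)) →
    queue.Pairwise ekt →
    queue.Perm ((buckets.keys.filter (fun t => !(buckets.getD t []).isEmpty)).map (entryF buckets)) →
    aLoop window mpt fuel buckets result
      = bLoop window mpt fuel buckets queue result recent cnt := by
  induction fuel with
  | zero => intro buckets queue result recent cnt _ _ _ _ _; rfl
  | succ fuel ih =>
    intro buckets queue result recent cnt hnd hrec hcnt hqs hqp
    simp only [aLoop, bLoop]
    set tcd : PySem.Dict String Int :=
      (if 1 < window then PySem.List.slice result (some (-(window - 1))) none else []).foldl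
        (fun d r => d.insert (primary_type_py r) (d.getD (primary_type_py r) 0 + 1))
        PySem.Dict.empty with htcd
    -- A's per-step trailing counter agrees with B's running counter cnt
    have htc : ∀ k, tcd.getD k 0 = cnt.getD k 0 := by
      intro k
      rw [htcd]
      have hh : (if 1 < window then PySem.List.slice result (some (-(window - 1))) none else [])
          = trailingOf window result := rfl
      rw [hh, tc_getD, ← hrec, hcnt]
    -- A's fitters/candidates as key filters
    have hfit :
        ((buckets.items.filter (fun p => !p.2.isEmpty && decide (tcd.getD p.1 0 < mpt))).map (fun p => p.1))
        = buckets.keys.filter (fun t => !(buckets.getD t []).isEmpty && decide (cnt.getD t 0 < mpt)) := by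
      rw [items_filter_map_fst buckets hnd [] (fun k v => !v.isEmpty && decide (tcd.getD k 0 < mpt))]
      refine List.filter_congr ?_
      intro k _
      rw [htc k]
    have hany :
        ((buckets.items.filter (fun p => !p.2.isEmpty)).map (fun p => p.1))
        = buckets.keys.filter (fun t => !(buckets.getD t []).isEmpty) := by
      exact items_filter_map_fst buckets hnd [] (fun _ v => !v.isEmpty)
    rw [hfit, hany]
    -- abbreviations
    set C := buckets.keys.filter (fun t => !(buckets.getD t []).isEmpty) with hCdef
    set F := buckets.keys.filter (fun t => !(buckets.getD t []).isEmpty && decide (cnt.getD t 0 < mpt)) with hFdef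
    have hCsub : C.Sublist buckets.keys := by rw [hCdef]; exact List.filter_sublist
    have hqpE : queue.Perm (C.map (entryF buckets)) := hqp
    have hmemq : ∀ e ∈ queue, e.2 ∈ C ∧ e = entryF buckets e.2 := by
      intro e he
      have he' := hqpE.mem_iff.mp he
      obtain ⟨t, htC, hte⟩ := List.mem_map.mp he'
      have h2 : e.2 = t := by rw [← hte]; rfl
      rw [h2]
      exact ⟨htC, hte.symm⟩
    have htypeq : ∀ t ∈ C, entryF buckets t ∈ queue := by
      intro t htC
      exact hqpE.symm.mem_iff.mp (List.mem_map_of_mem htC)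
    have hpC : ∀ t ∈ C, buckets.getD t [] ≠ [] := by
      intro t htC
      have := (List.mem_filter.mp (hCdef ▸ htC)).2
      simpa using this
    have hFmem : ∀ t, t ∈ F ↔ t ∈ C ∧ cnt.getD t 0 < mpt := by
      intro t
      rw [hCdef, hFdef]
      simp only [List.mem_filter, Bool.and_eq_true, decide_eq_true_eq]
      tauto
    -- the common continuation after the pick is identified
    have hcore : ∀ (e : (Int × Int) × String) (tw qs : List ((Int × Int) × String)),
        queue = tw ++ e :: qs → e = entryF buckets e.2 → e.2 ∈ C →
        (match buckets.getD e.2 [] with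
         | it :: rest => aLoop window mpt fuel (buckets.insert e.2 rest) (result ++ [it])
         | [] => aLoop window mpt fuel buckets result)
        = (match buckets.getD e.2 [] with
           | [] => bLoop window mpt fuel buckets queue result recent cnt
           | it :: pr =>
             if 1 < window then
               if window - 1 < ((recent ++ [primary_type_py it]).length : Int) then
                 match recent ++ [primary_type_py it] with
                 | v :: rest2 =>
                   bLoop window mpt fuel (buckets.insert e.2 pr)
                     (if e.1.1 + 1 < 0 then insortB (tw ++ qs) ((e.1.1 + 1, e.1.2), e.2) else tw ++ qs)
                     (result ++ [it]) rest2
                     ((cnt.insert (primary_type_py it) (cnt.getD (primary_type_py it) 0 + 1)).insert v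
                       ((cnt.insert (primary_type_py it) (cnt.getD (primary_type_py it) 0 + 1)).getD v 0 - 1))
                 | [] =>
                   bLoop window mpt fuel (buckets.insert e.2 pr)
                     (if e.1.1 + 1 < 0 then insortB (tw ++ qs) ((e.1.1 + 1, e.1.2), e.2) else tw ++ qs)
                     (result ++ [it]) (recent ++ [primary_type_py it])
                     (cnt.insert (primary_type_py it) (cnt.getD (primary_type_py it) 0 + 1))
               else
                 bLoop window mpt fuel (buckets.insert e.2 pr)
                   (if e.1.1 + 1 < 0 then insortB (tw ++ qs) ((e.1.1 + 1, e.1.2), e.2) else tw ++ qs)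
                   (result ++ [it]) (recent ++ [primary_type_py it])
                   (cnt.insert (primary_type_py it) (cnt.getD (primary_type_py it) 0 + 1))
             else
               bLoop window mpt fuel (buckets.insert e.2 pr)
                 (if e.1.1 + 1 < 0 then insortB (tw ++ qs) ((e.1.1 + 1, e.1.2), e.2) else tw ++ qs)
                 (result ++ [it]) recent cnt) := by
      intro e tw qs hsplit he heC
      rcases hB : buckets.getD e.2 [] with _ | ⟨it, pr⟩
      · exact ih buckets queue result recent cnt hnd hrec hcnt hqs hqp
      · -- live step
        have hcont : buckets.contains e.2 = true :=
          (PySem.Dict.contains_iff_mem_keys buckets e.2).mpr (hCsub.mem heC)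
        have hkeys' : (buckets.insert e.2 pr).keys = buckets.keys :=
          PySem.Dict.keys_insert_of_contains buckets pr hcont
        have hnd' : (buckets.insert e.2 pr).keys.Nodup := by rw [hkeys']; exact hnd
        -- the stored key of e
        have he11 : e.1.1 = -(((it :: pr).length : Nat) : Int) := by
          rw [he]; simp only [entryF, hB]
        have he12 : e.1.2 = ((List.idxOf e.2 buckets.keys : Nat) : Int) := by
          rw [he]; rfl
        -- nodup types along the queue's entry list
        have hCnd : C.Nodup := by rw [hCdef]; exact hnd.filter _
        obtain ⟨C1, C2, hC12⟩ := List.append_of_mem heC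
        have hC1n : e.2 ∉ C1 := by
          intro hmem
          have := hC12 ▸ hCnd
          rcases List.nodup_append.mp this with ⟨_, _, hdisj⟩
          exact hdisj e.2 hmem e.2 List.mem_cons_self rfl
        have hC2n : e.2 ∉ C2 := by
          have := hC12 ▸ hCnd
          rcases List.nodup_append.mp this with ⟨_, h2, _⟩
          exact (List.nodup_cons.mp h2).1
        -- queue minus the picked entry
        have hqrest_perm : (tw ++ qs).Perm (C1.map (entryF buckets) ++ C2.map (entryF buckets)) := by
          have hEq : (C.map (entryF buckets)).Perm (e :: (tw ++ qs)) :=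
            hqp.symm.trans (by rw [hsplit]; exact List.perm_middle)
          have hEm : C.map (entryF buckets)
              = C1.map (entryF buckets) ++ entryF buckets e.2 :: C2.map (entryF buckets) := by
            rw [hC12]; simp
          have h1 : (e :: (tw ++ qs)).Perm
              (e :: (C1.map (entryF buckets) ++ C2.map (entryF buckets))) := by
            refine hEq.symm.trans ?_
            rw [hEm, ← he]
            exact List.perm_middle
          exact h1.cons_inv
        have hqrest_sorted : (tw ++ qs).Pairwise ekt := by
          refine List.Pairwise.sublist ?_ (hsplit ▸ hqs)
          exact List.Sublist.append_left (List.sublist_cons_self e qs) tw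
        -- fresh tie-break index for the reinserted entry
        have hfresh : ∀ x ∈ tw ++ qs, x.1.2 ≠ e.1.2 := by
          have hEpw : (C.map (entryF buckets)).Pairwise (fun a b => a.1.2 ≠ b.1.2) :=
            entries_pairwise_idx buckets hnd C hCsub
          have hqpw : queue.Pairwise (fun a b => a.1.2 ≠ b.1.2) :=
            (List.Perm.pairwise_iff (fun h => Ne.symm h) hqp).mpr hEpw
          have hqpw2 : (e :: (tw ++ qs)).Pairwise (fun a b => a.1.2 ≠ b.1.2) := by
            refine (List.Perm.pairwise_iff (fun h => Ne.symm h) ?_).mp hqpw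
            rw [hsplit]; exact List.perm_middle
          intro x hx
          exact Ne.symm ((List.pairwise_cons.mp hqpw2).1 x hx)
        -- the new queue satisfies the invariants w.r.t. the updated buckets
        have hqueue' :
            (if e.1.1 + 1 < 0 then insortB (tw ++ qs) ((e.1.1 + 1, e.1.2), e.2) else tw ++ qs).Pairwise ekt ∧
            (if e.1.1 + 1 < 0 then insortB (tw ++ qs) ((e.1.1 + 1, e.1.2), e.2) else tw ++ qs).Perm
              (((buckets.insert e.2 pr).keys.filter
                  (fun t => !((buckets.insert e.2 pr).getD t []).isEmpty)).map (entryF (buckets.insert e.2 pr))) := by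
          have hgetD' : ∀ t, (buckets.insert e.2 pr).getD t [] = if t = e.2 then pr else buckets.getD t [] :=
            fun t => PySem.Dict.getD_insert buckets e.2 t pr []
          have hentry' : ∀ x, x ≠ e.2 → entryF (buckets.insert e.2 pr) x = entryF buckets x := by
            intro x hx
            simp only [entryF, hgetD', if_neg hx, hkeys']
          by_cases hpr : e.1.1 + 1 < 0
          · -- bucket still non-empty: same candidate set, re-keyed entry
            have hprne : pr ≠ [] := by
              intro hnil
              rw [hnil] at he11
              simp at he11
              omega
            have hC' : (buckets.insert e.2 pr).keys.filter
                (fun t => !((buckets.insert e.2 pr).getD t []).isEmpty) = C := by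
              rw [hkeys', hCdef]
              refine List.filter_congr ?_
              intro t _
              rw [hgetD']
              by_cases hte : t = e.2
              · rw [if_pos hte, hte, hB]
                simp [hprne]
              · rw [if_neg hte]
            have hnewe : entryF (buckets.insert e.2 pr) e.2 = ((e.1.1 + 1, e.1.2), e.2) := by
              unfold entryF
              rw [PySem.Dict.getD_insert_self, hkeys']
              rw [Prod.ext_iff, Prod.ext_iff]
              refine ⟨⟨?_, he12.symm⟩, rfl⟩
              rw [he11]
              simp only [List.length_cons]
              push_cast
              ring
            have hE' : (C.map (entryF (buckets.insert e.2 pr))).Perm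
                (((e.1.1 + 1, e.1.2), e.2) :: (C1.map (entryF buckets) ++ C2.map (entryF buckets))) := by
              have hm : C.map (entryF (buckets.insert e.2 pr))
                  = C1.map (entryF buckets) ++ ((e.1.1 + 1, e.1.2), e.2) :: C2.map (entryF buckets) := by
                rw [hC12]
                simp only [List.map_append, List.map_cons]
                rw [hnewe]
                congr 1
                · exact List.map_congr_left (fun x hx => hentry' x (fun hh => hC1n (hh ▸ hx)))
                · congr 1
                  exact List.map_congr_left (fun x hx => hentry' x (fun hh => hC2n (hh ▸ hx)))
              rw [hm]
              exact List.perm_middle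
            rw [if_pos hpr]
            constructor
            · refine insort_sorted _ _ hqrest_sorted ?_
              intro x hx
              intro hh
              exact hfresh x hx (by rw [hh])
            · refine ((insort_perm _ _).trans ?_)
              rw [hC']
              refine (List.Perm.cons _ hqrest_perm).trans ?_
              exact hE'.symm
          · -- bucket emptied: drop the type from the candidates
            have hprnil : pr = [] := by
              rcases pr with _ | ⟨x, xs⟩
              · rfl
              · exfalso
                simp only [List.length_cons] at he11
                push_cast at he11
                omega
            subst hprnil
            have hC' : (buckets.insert e.2 []).keys.filter
                (fun t => !((buckets.insert e.2 []).getD t []).isEmpty) = C.erase e.2 := by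
              rw [hkeys']
              rw [hCdef]
              refine filter_erase_point e.2 _ _ ?_ ?_ ?_ buckets.keys hnd
              · intro x hx
                rw [hgetD', if_neg hx]
              · rw [hB]; rfl
              · rw [hgetD', if_pos rfl]; rfl
            have hCe : C.erase e.2 = C1 ++ C2 := by
              rw [hC12, List.erase_append_right _ hC1n, List.erase_cons_head]
            rw [if_neg hpr]
            refine ⟨hqrest_sorted, ?_⟩
            rw [hC', hCe]
            refine hqrest_perm.trans ?_
            rw [List.map_append]
            refine List.Perm.append ?_ ?_
            · exact (List.map_congr_left (fun x hx => (hentry' x (fun hh => hC1n (hh ▸ hx))).symm)) ▸ List.Perm.refl _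
            · exact (List.map_congr_left (fun x hx => (hentry' x (fun hh => hC2n (hh ▸ hx))).symm)) ▸ List.Perm.refl _
        obtain ⟨hqs', hqp'⟩ := hqueue'
        exact window_step window mpt fuel ih (buckets.insert e.2 pr) _ result recent cnt it
          hnd' hrec hcnt hqs' hqp'
    -- now identify B's pick with A's pick
    rcases hdwq : queue.dropWhile (fun e => decide (mpt ≤ cnt.getD e.2 0)) with _ | ⟨e, qs⟩
    · -- every entry blocked (or queue empty)
      have hall : ∀ x ∈ queue, decide (mpt ≤ cnt.getD x.2 0) = true :=
        List.dropWhile_eq_nil_iff.mp hdwq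
      have htake : queue.takeWhile (fun e => decide (mpt ≤ cnt.getD e.2 0)) = queue := by
        have hh := List.takeWhile_append_dropWhile
          (p := fun (e : (Int × Int) × String) => decide (mpt ≤ cnt.getD e.2 0)) (l := queue)
        rw [hdwq, List.append_nil] at hh
        exact hh
      have hscan : scanPosB cnt mpt queue = queue.length := by
        rw [scanPos_eq, htake]
      have hFnil : F = [] := by
        rw [List.eq_nil_iff_forall_not_mem]
        intro t htF
        obtain ⟨htC, hlt⟩ := (hFmem t).mp htF
        have hb := hall _ (htypeq t htC)
        simp only [entryF, decide_eq_true_eq] at hb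
        omega
      rw [hFnil]
      simp only [List.isEmpty_nil, Bool.not_true, Bool.false_eq_true, if_false]
      rcases hqq : queue with _ | ⟨e0, qs0⟩
      · -- queue empty: no candidates at all; both sides idle this step
        subst hqq
        have hCnil : C = [] := by
          have hmapnil : C.map (entryF buckets) = [] := (hqpE.symm).eq_nil
          exact List.map_eq_nil_iff.mp hmapnil
        rw [hCnil]
        have hmax : PySem.List.max? ([] : List String) (fun t => (buckets.getD t []).length) = none := by
          rw [PySem.List.max?_eq_none_iff]
        rw [hmax]
        have hB0 : buckets.getD (none.getD "") [] = [] := by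
          by_cases hc : buckets.contains "" = true
          · by_contra hne
            have hmem : "" ∈ C := by
              rw [hCdef, List.mem_filter]
              refine ⟨(PySem.Dict.contains_iff_mem_keys buckets "").mp hc, ?_⟩
              simpa using hne
            rw [hCnil] at hmem
            cases hmem
          · exact PySem.Dict.getD_of_not_contains buckets [] (by simpa using hc)
        rw [hB0]
        have hpop : PySem.List.pop? ([] : List ((Int × Int) × String))
            ((if (scanPosB cnt mpt ([] : List ((Int × Int) × String)) == ([] : List ((Int × Int) × String)).length) = true then 0 else scanPosB cnt mpt []) : Nat) = none := by
          simp [PySem.List.pop?, PySem.List.pyIdx?]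
        rw [hpop]
        exact ih buckets [] result recent cnt hnd hrec hcnt hqs hqp
      · -- queue = e0 :: qs0, every type blocked: fall back to the overall largest bucket
        subst hqq
        obtain ⟨he0C, he0⟩ := hmemq e0 List.mem_cons_self
        have hpick : (PySem.List.max? C (fun t => (buckets.getD t []).length)).getD "" = e0.2 := by
          refine max?_getD_eq _ (fun t => ((List.idxOf t buckets.keys : Nat) : Int)) C
            ((pairwise_idxOf buckets.keys hnd).sublist hCsub) e0.2 he0C ?_
          intro x hxC hxne
          have hxq : entryF buckets x ∈ e0 :: qs0 := htypeq x hxC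
          rcases List.mem_cons.mp hxq with hh | hh
          · exfalso
            apply hxne
            have : (entryF buckets x).2 = e0.2 := by rw [hh]
            simpa [entryF] using this
          · have hrel : ekt e0 (entryF buckets x) := (List.pairwise_cons.mp hqs).1 _ hh
            have hkey : e0.1 = (-(((buckets.getD e0.2 []).length : Nat) : Int), ((List.idxOf e0.2 buckets.keys : Nat) : Int)) := by
              rw [he0]; rfl
            unfold ekt at hrel
            rw [hkey] at hrel
            exact hrel
        rw [hpick]
        have hlen0 : scanPosB cnt mpt (e0 :: qs0) = (e0 :: qs0).length := hscan
        have hcond : ((scanPosB cnt mpt (e0 :: qs0) == (e0 :: qs0).length)) = true := by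
          rw [hlen0]; simp
        rw [hcond]
        simp only [if_true]
        have hpop : PySem.List.pop? (e0 :: qs0) ((0 : Nat) : Int) = some (e0, qs0) := by
          exact_mod_cast PySem.List.pop?_zero_cons e0 qs0
        rw [hpop]
        exact hcore e0 [] qs0 rfl he0 he0C
    · -- an unblocked entry exists: it is the first one past the blocked prefix
      set blkf := fun (e : (Int × Int) × String) => decide (mpt ≤ cnt.getD e.2 0) with hblkf
      set tw := queue.takeWhile blkf with htw
      have hsplit : queue = tw ++ e :: qs := by
        rw [htw, ← hdwq]
        exact (List.takeWhile_append_dropWhile).symm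
      obtain ⟨heC, he⟩ := hmemq e (by rw [hsplit]; exact List.mem_append_right _ List.mem_cons_self)
      have hblk_e : blkf e = false := by
        have hh := List.head?_dropWhile_not blkf queue
        rw [hdwq] at hh
        simpa using hh
      have hcntlt : cnt.getD e.2 0 < mpt := by
        rw [hblkf] at hblk_e
        simp only [decide_eq_false_iff_not, not_le] at hblk_e
        exact hblk_e
      have heF : e.2 ∈ F := (hFmem e.2).mpr ⟨heC, hcntlt⟩
      have hFne : F ≠ [] := List.ne_nil_of_mem heF
      have hFbool : (!F.isEmpty) = true := by
        simp [List.isEmpty_iff, hFne]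
      rw [hFbool]
      simp only [if_true]
      have hpick : (PySem.List.max? F (fun t => (buckets.getD t []).length)).getD "" = e.2 := by
        refine max?_getD_eq _ (fun t => ((List.idxOf t buckets.keys : Nat) : Int)) F
          ((pairwise_idxOf buckets.keys hnd).sublist (hFdef ▸ List.filter_sublist)) e.2 heF ?_
        intro x hxF hxne
        have hxC : x ∈ C := ((hFmem x).mp hxF).1
        have hxq : entryF buckets x ∈ queue := htypeq x hxC
        rw [hsplit] at hxq
        rcases List.mem_append.mp hxq with hh | hh
        · exfalso
          have hbx := List.mem_takeWhile_imp (htw ▸ hh)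
          rw [hblkf] at hbx
          simp only [entryF, decide_eq_true_eq] at hbx
          have := ((hFmem x).mp hxF).2
          omega
        · rcases List.mem_cons.mp hh with hh' | hh'
          · exfalso
            apply hxne
            have : (entryF buckets x).2 = e.2 := by rw [hh']
            simpa [entryF] using this
          · have hqs2 : (e :: qs).Pairwise ekt :=
              (List.pairwise_append.mp (hsplit ▸ hqs)).2.1
            have hrel : ekt e (entryF buckets x) := (List.pairwise_cons.mp hqs2).1 _ hh'
            have hkey : e.1 = (-(((buckets.getD e.2 []).length : Nat) : Int), ((List.idxOf e.2 buckets.keys : Nat) : Int)) := by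
              rw [he]; rfl
            unfold ekt at hrel
            rw [hkey] at hrel
            exact hrel
      rw [hpick]
      -- B's scan stops at |tw| and pops e
      have hlt : tw.length < queue.length := by
        rw [hsplit]
        simp
      have hscan : scanPosB cnt mpt queue = tw.length := by
        rw [scanPos_eq, ← hblkf, ← htw]
      have hcond : ((tw.length == queue.length)) = false := by
        simp
        omega
      rw [hscan, hcond]
      simp only [Bool.false_eq_true, if_false]
      have hpop : PySem.List.pop? queue ((tw.length : Nat) : Int) = some (e, tw ++ qs) := by
        rw [PySem.List.pop?_natCast queue tw.length (by omega)]
        congr 1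
        have hget : queue[tw.length]'(by omega) = e := by
          rw [List.getElem_of_eq hsplit, List.getElem_append_right (le_refl tw.length)]
          simp
        have herase : queue.eraseIdx tw.length = tw ++ qs := by
          rw [hsplit, List.eraseIdx_append_of_length_le (le_refl tw.length)]
          simp
        rw [hget, herase]
      rw [hpop]
      exact hcore e tw qs hsplit he heC

-- ===== VERDICT =====
theorem diversify_by_channel_py_spec : Claim_equal_diversify_by_channel_py := by
  intro ranked window mpt _
  unfold Spec_diversify_by_channel_py diversify_by_channel_py diversify_by_channel_py_alt
  simp only []
  have hnd0 : (PySem.Dict.empty : PySem.Dict String (List (List (String × List String)))).keys.Nodup := by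
    simp [PySem.Dict.keys_empty]
  have hix0 : ∀ t ∈ (PySem.Dict.empty : PySem.Dict String (List (List (String × List String)))).keys,
      (PySem.Dict.empty : PySem.Dict String Int).getD t 0
        = ((List.idxOf t (PySem.Dict.empty : PySem.Dict String (List (List (String × List String)))).keys : Nat) : Int) := by
    intro t ht
    rw [PySem.Dict.keys_empty] at ht
    cases ht
  obtain ⟨hb1, hb2⟩ := build_eq2 ranked PySem.Dict.empty PySem.Dict.empty hnd0 hix0
  set buckets := ranked.foldl
    (fun d s => d.modify (primary_type_py s) [] (fun b => b ++ [s])) PySem.Dict.empty with hbuckets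
  have hnd : buckets.keys.Nodup := by
    exact PySem.Dict.nodup_keys_foldl_modify_key ranked (fun s => primary_type_py s) []
      (fun _ s v => v ++ [s]) PySem.Dict.empty hnd0
  rw [hb1]
  -- the initial priority list is the sorted entry list of all buckets
  have hne0 : ∀ t ∈ buckets.keys, buckets.getD t [] ≠ [] := by
    refine buckets_nonempty ranked PySem.Dict.empty ?_
    intro t ht
    rw [PySem.Dict.keys_empty] at ht
    cases ht
  have hitems : buckets.items = buckets.keys.map (fun k => (k, buckets.getD k [])) :=
    PySem.Dict.items_eq_map_keys buckets hnd []
  have hmapE : buckets.items.map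
      (fun p => ((-(p.2.length : Int),
        (ranked.foldl
          (fun (pi : PySem.Dict String (List (List (String × List String))) × PySem.Dict String Int) s =>
            let t := primary_type_py s
            let pi1 := if pi.1.contains t then pi else (pi.1.insert t [], pi.2.insert t (pi.1.size : Int))
            (pi1.1.modify t [] (fun b => b ++ [s]), pi1.2)) (PySem.Dict.empty, PySem.Dict.empty)).2.getD p.1 0), p.1))
      = buckets.keys.map (entryF buckets) := by
    rw [hitems, List.map_map]
    refine List.map_congr_left ?_
    intro k hk
    simp only [Function.comp]
    rw [hb2 k hk]
    rfl
  have hfold : ∀ (q0 : List ((Int × Int) × String)),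
      (buckets.items.foldl
        (fun q p => insortB q ((-(p.2.length : Int),
          (ranked.foldl
            (fun (pi : PySem.Dict String (List (List (String × List String))) × PySem.Dict String Int) s =>
              let t := primary_type_py s
              let pi1 := if pi.1.contains t then pi else (pi.1.insert t [], pi.2.insert t (pi.1.size : Int))
              (pi1.1.modify t [] (fun b => b ++ [s]), pi1.2)) (PySem.Dict.empty, PySem.Dict.empty)).2.getD p.1 0), p.1)) q0)
      = ((buckets.keys.map (entryF buckets)).foldl insortB q0) := by
    intro q0
    rw [← hmapE, ← List.foldl_map]
  have hEpw : (buckets.keys.map (entryF buckets)).Pairwise (fun a b => a.1 ≠ b.1) := by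
    refine (entries_pairwise_idx buckets hnd buckets.keys (List.Sublist.refl _)).imp ?_
    intro a b h heq
    exact h (congrArg Prod.snd heq)
  obtain ⟨hq0s, hq0p⟩ := foldl_insort (buckets.keys.map (entryF buckets)) [] List.Pairwise.nil
    (by simpa using hEpw)
  have hfilter : buckets.keys.filter (fun t => !(buckets.getD t []).isEmpty) = buckets.keys := by
    rw [List.filter_eq_self]
    intro t ht
    simpa using hne0 t ht
  rw [hfold]
  refine loop_eq window mpt ranked.length buckets _ [] [] PySem.Dict.empty hnd ?_ ?_ hq0s ?_
  · have h0 : trailingOf window ([] : List (List (String × List String))) = [] := by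
      unfold trailingOf
      split <;> simp [PySem.List.slice]
    rw [h0]
    rfl
  · intro u
    simp [PySem.Dict.getD_empty]
  · rw [hfilter]
    simpa using hq0p
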